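-- pv_equiv track=rewrite | github.com/tomytp/icpc-lib | latex/preprocessor.py | inject_custom_type_markup
-- ===== SOURCE A (Python) =====
-- CUSTOM_TYPES = {
--     "ll", "ull", "ld", "i64", "u64",
--     "p64", "pii", "pll", "v64", "vll",
--     "vi", "vii", "vvi"
-- }
--
-- def is_ident_char(c: str) -> bool:
--     return c == '_' or c.isalnum()
--
-- def inject_custom_type_markup(s: str) -> str:
--     """Add LaTeX markup for custom types."""
--     out = []
--     i, n = 0, len(s)
--     while i < n:
--         if is_ident_char(s[i]):
--             j = i
--             while j < n and is_ident_char(s[j]):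
--                 j += 1
--             tok = s[i:j]
--             if tok in CUSTOM_TYPES:
--                 out.append("@\\typ{" + tok + "}@")
--             else:
--                 out.append(tok)
--             i = j
--         else:
--             out.append(s[i])
--             i += 1
--     return ''.join(out)
-- ===== SOURCE B (Python) =====
-- # B: dictionary-pattern scan -- instead of tokenizing the string into maximal
-- # ident runs, try each known custom-type token at every position with boundary
-- # checks and wrap the match; no runs are ever materialized.
-- CUSTOM_TYPES = {
--     "ll", "ull", "ld", "i64", "u64",
--     "p64", "pii", "pll", "v64", "vll",
--     "vi", "vii", "vvi"
-- }
--
-- TOKENS = sorted(CUSTOM_TYPES)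
--
-- def is_ident_char(c: str) -> bool:
--     return c == '_' or c.isalnum()
--
-- def _match_len(s: str, i: int) -> int:
--     # length of the custom-type token occurring at i as a whole identifier, else 0
--     n = len(s)
--     for t in TOKENS:
--         m = len(t)
--         if (s[i:i+m] == t
--                 and (i == 0 or not is_ident_char(s[i-1]))
--                 and (i + m == n or not is_ident_char(s[i+m]))):
--             return m
--     return 0
--
-- def inject_custom_type_markup(s: str) -> str:
--     out = []
--     i, n = 0, len(s)
--     while i < n:
--         m = _match_len(s, i)
--         if m:
--             out.append("@\\typ{" + s[i:i+m] + "}@")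
--             i += m
--         else:
--             out.append(s[i])
--             i += 1
--     return ''.join(out)
-- ===== Notes on version B (the rewrite author's own statement) =====
-- stated objective: alternative
-- what changed: Instead of tokenizing the string into maximal identifier runs and testing each run against the set, B scans positions and tries each known custom-type token at the current position with whole-identifier boundary checks (s[i:i+m]==t, non-ident neighbours), wrapping on a match; it never materializes identifier runs.
import Mathlib
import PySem

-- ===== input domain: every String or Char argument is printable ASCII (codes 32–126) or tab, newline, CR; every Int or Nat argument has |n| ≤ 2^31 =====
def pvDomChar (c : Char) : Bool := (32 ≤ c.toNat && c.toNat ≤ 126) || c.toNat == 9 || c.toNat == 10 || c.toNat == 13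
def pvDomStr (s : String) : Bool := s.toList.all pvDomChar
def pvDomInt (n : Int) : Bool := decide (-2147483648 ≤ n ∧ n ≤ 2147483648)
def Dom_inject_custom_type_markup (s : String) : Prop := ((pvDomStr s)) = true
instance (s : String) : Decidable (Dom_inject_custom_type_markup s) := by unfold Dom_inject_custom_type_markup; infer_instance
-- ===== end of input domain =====

-- B replaces A's run tokenization by a dictionary-pattern scan: at each position it
-- tries each known custom-type token with whole-identifier boundary checks (objective:
-- alternative; same output).

-- shared module context: the CUSTOM_TYPES set and is_ident_char predicate
def CUSTOM_TYPES : List (List Char) :=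
  ["ll".toList, "ull".toList, "ld".toList, "i64".toList, "u64".toList,
   "p64".toList, "pii".toList, "pll".toList, "v64".toList, "vll".toList,
   "vi".toList, "vii".toList, "vvi".toList]

def identChar (c : Char) : Bool := c == '_' || PySem.Chars.isalnum c

def typWrap (tok : List Char) : List Char := "@\\typ{".toList ++ tok ++ "}@".toList

-- ===== PORT A =====
-- inner while loop: advance j while j < n and is_ident_char(s[j])
def innerScan (cs : List Char) (n j : Nat) : Nat :=
  if h : j < n ∧ identChar (cs.getD j default) = true then innerScan cs n (j + 1) else j
termination_by n - j
decreasing_by omega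

theorem le_innerScan (cs : List Char) (n j : Nat) : j ≤ innerScan cs n j := by
  rw [innerScan]
  split
  · exact Nat.le_trans (Nat.le_succ j) (le_innerScan cs n (j + 1))
  · exact Nat.le_refl j
termination_by n - j
decreasing_by omega

theorem lt_innerScan (cs : List Char) (n i : Nat)
    (h1 : i < n) (h2 : identChar (cs.getD i default) = true) : i < innerScan cs n i := by
  rw [innerScan]
  simp only [h1, h2, and_self, dite_true]
  exact Nat.lt_of_lt_of_le (Nat.lt_succ_self i) (le_innerScan cs n (i + 1))

-- outer while loop of A
def loopA (cs : List Char) (n i : Nat) (out : List (List Char)) : List (List Char) :=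
  if _hi : i < n then
    if _hc : identChar (cs.getD i default) then
      let j := innerScan cs n i
      let tok := (cs.drop i).take (j - i)
      loopA cs n j (out ++ [if CUSTOM_TYPES.contains tok then typWrap tok else tok])
    else
      loopA cs n (i + 1) (out ++ [[cs.getD i default]])
  else out
termination_by n - i
decreasing_by
  · have := lt_innerScan cs n i _hi _hc; omega
  · omega

def inject_custom_type_markup (s : String) : String :=
  String.ofList (loopA s.toList s.toList.length 0 []).flatten

-- ===== PORT B =====
-- TOKENS = sorted(CUSTOM_TYPES)
def tokens : List (List Char) :=
  ["i64".toList, "ld".toList, "ll".toList, "p64".toList, "pii".toList,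
   "pll".toList, "u64".toList, "ull".toList, "v64".toList, "vi".toList,
   "vii".toList, "vll".toList, "vvi".toList]

-- one candidate test of _match_len: s[i:i+m]==t (i ≥ 0, so the slice is drop/take,
-- exact) and the two boundary checks; Python's short-circuit guards the index
-- accesses, the Lean getD is only relevant on the same in-range cases
def condAt (cs : List Char) (i : Nat) (t : List Char) : Bool :=
  ((cs.drop i).take t.length == t)
  && (decide (i = 0) || !identChar (cs.getD (i - 1) default))
  && (decide (i + t.length = cs.length) || !identChar (cs.getD (i + t.length) default))

-- the for-loop of _match_len: first token matching at i, else 0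
def matchGo (cs : List Char) (i : Nat) : List (List Char) → Nat
  | [] => 0
  | t :: ts => if condAt cs i t then t.length else matchGo cs i ts

-- the while loop of B
def loopB (cs : List Char) (n i : Nat) (out : List (List Char)) : List (List Char) :=
  if _hi : i < n then
    if _hm : matchGo cs i tokens ≠ 0 then
      loopB cs n (i + matchGo cs i tokens) (out ++ [typWrap ((cs.drop i).take (matchGo cs i tokens))])
    else
      loopB cs n (i + 1) (out ++ [[cs.getD i default]])
  else out
termination_by n - i
decreasing_by
  · omega
  · omega

def inject_custom_type_markup_alt (s : String) : String :=
  String.ofList (loopB s.toList s.toList.length 0 []).flatten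

-- ===== PRECONDITION & SPEC =====
def Spec_inject_custom_type_markup (s : String) (out : String) : Prop := out = inject_custom_type_markup_alt s
instance (s : String) (out : String) : Decidable (Spec_inject_custom_type_markup s out) := by unfold Spec_inject_custom_type_markup; infer_instance

-- ===== CLAIM (what is proved, stated in full; the proofs are below) =====
def Claim_equal_inject_custom_type_markup : Prop := ∀ (s : String), Dom_inject_custom_type_markup s → Spec_inject_custom_type_markup s (inject_custom_type_markup s)

-- ===== LEMMAS AND PROOFS =====

-- proof-side reference: A's loop expressed on the remaining suffix
def specA (cs : List Char) : List (List Char) :=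
  match cs with
  | [] => []
  | c :: rest =>
      if identChar c then
        (let tok := c :: rest.takeWhile identChar
         if CUSTOM_TYPES.contains tok then typWrap tok else tok) ::
          specA (rest.dropWhile identChar)
      else [c] :: specA rest
termination_by cs.length
decreasing_by
  · have := List.length_dropWhile_le identChar rest
    simp only [List.length_cons]; omega
  · simp

theorem take_len_takeWhile (p : Char → Bool) (l : List Char) :
    l.take (l.takeWhile p).length = l.takeWhile p := by
  induction l with
  | nil => rfl
  | cons a l ih => by_cases h : p a <;> simp [h, ih]

theorem drop_len_takeWhile (p : Char → Bool) (l : List Char) :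
    l.drop (l.takeWhile p).length = l.dropWhile p := by
  induction l with
  | nil => rfl
  | cons a l ih => by_cases h : p a <;> simp [h, ih]

theorem innerScan_eq (cs : List Char) (i : Nat) (h : i ≤ cs.length) :
    innerScan cs cs.length i = i + ((cs.drop i).takeWhile identChar).length := by
  rw [innerScan]
  by_cases hi : i < cs.length
  · have hdrop : cs.drop i = cs[i] :: cs.drop (i + 1) := List.drop_eq_getElem_cons hi
    have hgd : cs.getD i default = cs[i] := List.getD_eq_getElem cs default hi
    by_cases hc : identChar cs[i]
    · have htw : (cs.drop i).takeWhile identChar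
          = cs[i] :: (cs.drop (i + 1)).takeWhile identChar := by
        rw [hdrop, List.takeWhile_cons_of_pos hc]
      simp only [hi, hgd, hc, and_self, dite_true]
      rw [innerScan_eq cs (i + 1) (by omega), htw]
      simp; omega
    · have htw : (cs.drop i).takeWhile identChar = [] := by
        rw [hdrop]; simp [hc]
      simp [hi, hc, htw]
  · have : i = cs.length := by omega
    simp [this, List.drop_length]
termination_by cs.length - i
decreasing_by omega

theorem innerScan_le (cs : List Char) (i : Nat) (h : i ≤ cs.length) :
    innerScan cs cs.length i ≤ cs.length := by
  rw [innerScan_eq cs i h]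
  have h1 : ((cs.drop i).takeWhile identChar).length ≤ (cs.drop i).length :=
    (List.takeWhile_sublist identChar).length_le
  have h2 : (cs.drop i).length = cs.length - i := List.length_drop ..
  omega

theorem loopA_eq (cs : List Char) (i : Nat) (out : List (List Char)) (h : i ≤ cs.length) :
    loopA cs cs.length i out = out ++ specA (cs.drop i) := by
  rw [loopA]
  by_cases hi : i < cs.length
  · have hdrop : cs.drop i = cs[i] :: cs.drop (i + 1) := List.drop_eq_getElem_cons hi
    have hgd : cs.getD i default = cs[i] := List.getD_eq_getElem cs default hi
    by_cases hc : identChar cs[i]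
    · have htw : (cs.drop i).takeWhile identChar
          = cs[i] :: (cs.drop (i + 1)).takeWhile identChar := by
        rw [hdrop, List.takeWhile_cons_of_pos hc]
      have hdw : (cs.drop i).dropWhile identChar
          = (cs.drop (i + 1)).dropWhile identChar := by
        rw [hdrop, List.dropWhile_cons_of_pos hc]
      have hj := innerScan_eq cs i (by omega)
      have htok : (cs.drop i).take (innerScan cs cs.length i - i) = (cs.drop i).takeWhile identChar := by
        rw [hj]
        simpa using take_len_takeWhile identChar (cs.drop i)
      have hdropj : cs.drop (innerScan cs cs.length i) = (cs.drop i).dropWhile identChar := by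
        have h0 := drop_len_takeWhile identChar (cs.drop i)
        rw [List.drop_drop] at h0
        rw [hj]; exact h0
      simp only [hi, hgd, hc, dite_true]
      rw [loopA_eq cs (innerScan cs cs.length i) _ (innerScan_le cs i (by omega))]
      rw [htok, hdropj, List.append_assoc]
      congr 1
      conv_rhs => rw [hdrop, specA]
      simp only [hc, if_pos, ← htw]
      rw [hdw, List.singleton_append]
    · simp only [hi, hgd, hc, dite_true, Bool.false_eq_true]
      rw [loopA_eq cs (i + 1) _ (by omega), List.append_assoc]
      conv_rhs => rw [hdrop, specA]
      simp [hc]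
  · have : i = cs.length := by omega
    simp [this, List.drop_length, specA]
termination_by cs.length - i
decreasing_by
  all_goals try omega
  have := lt_innerScan cs cs.length i hi (by rw [hgd]; exact hc); omega

-- ===== B-side lemmas =====

theorem flatten_map_singleton (l : List Char) : (l.map (fun c => [c])).flatten = l := by
  induction l with
  | nil => rfl
  | cons a l ih => simp [ih]

theorem tokens_ok : ∀ t ∈ tokens, t ≠ [] ∧ ∀ c ∈ t, identChar c = true := by
  intro t ht
  fin_cases ht <;> exact ⟨by simp, by intro c hc; fin_cases hc <;> rfl⟩

theorem mem_tokens_iff (t : List Char) : t ∈ tokens ↔ t ∈ CUSTOM_TYPES := by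
  constructor <;> intro h <;> fin_cases h <;> simp [tokens, CUSTOM_TYPES]

theorem dropWhile_head_false (l : List Char) (x : Char) (xs : List Char)
    (h : l.dropWhile identChar = x :: xs) : identChar x = false := by
  induction l with
  | nil => simp at h
  | cons a l ih =>
    by_cases ha : identChar a
    · rw [List.dropWhile_cons_of_pos ha] at h; exact ih h
    · rw [List.dropWhile_cons_of_neg ha] at h
      cases h; simpa using ha

theorem takeWhile_append_of (t r : List Char) (h : ∀ c ∈ t, identChar c = true)
    (hr : r.takeWhile identChar = []) : (t ++ r).takeWhile identChar = t := by
  induction t with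
  | nil => simpa using hr
  | cons a t ih =>
    rw [List.cons_append, List.takeWhile_cons_of_pos (h a (by simp))]
    rw [ih (fun c hc => h c (by simp [hc]))]

theorem condAt_iff (cs : List Char) (i : Nat) (hi : i < cs.length)
    (hb : i = 0 ∨ identChar (cs.getD (i - 1) default) = false)
    (t : List Char) (_htne : t ≠ []) (hta : ∀ c ∈ t, identChar c = true) :
    condAt cs i t = true ↔ t = (cs.drop i).takeWhile identChar := by
  have hleft : (decide (i = 0) || !identChar (cs.getD (i - 1) default)) = true := by
    rcases hb with h | h
    · simp [h]
    · rw [h]; simp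
  unfold condAt
  rw [hleft]
  simp only [Bool.and_true, Bool.and_eq_true, beq_iff_eq, Bool.or_eq_true,
    decide_eq_true_eq, Bool.not_eq_true']
  constructor
  · rintro ⟨h1, h2⟩
    have hlen : t.length ≤ (cs.drop i).length := by
      have := congrArg List.length h1
      simp only [List.length_take] at this
      omega
    have hdl : (cs.drop i).length = cs.length - i := List.length_drop ..
    have hin : i + t.length ≤ cs.length := by omega
    have hsplit : cs.drop i = t ++ cs.drop (i + t.length) := by
      conv_lhs => rw [← List.take_append_drop t.length (cs.drop i)]
      rw [h1, List.drop_drop]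
    have hr : (cs.drop (i + t.length)).takeWhile identChar = [] := by
      by_cases hlt : i + t.length < cs.length
      · have hdrop2 : cs.drop (i + t.length) = cs[i + t.length] :: cs.drop (i + t.length + 1) :=
          List.drop_eq_getElem_cons hlt
        have hgd2 : cs.getD (i + t.length) default = cs[i + t.length] :=
          List.getD_eq_getElem cs default hlt
        rcases h2 with h2 | h2
        · omega
        · have hx : ¬ identChar cs[i + t.length] = true := by
            rw [← hgd2, h2]; simp
          rw [hdrop2, List.takeWhile_cons_of_neg hx]
      · have : i + t.length = cs.length := by omega
        simp [this, List.drop_length]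
    rw [hsplit, takeWhile_append_of t _ hta hr]
  · intro ht
    constructor
    · rw [ht]; exact take_len_takeWhile identChar (cs.drop i)
    · have hdl : (cs.drop i).length = cs.length - i := List.length_drop ..
      have hlen : t.length ≤ (cs.drop i).length := by
        rw [ht]; exact (List.takeWhile_sublist identChar).length_le
      have hdw : cs.drop (i + t.length) = (cs.drop i).dropWhile identChar := by
        have h0 := drop_len_takeWhile identChar (cs.drop i)
        rw [List.drop_drop] at h0
        rw [← h0, ht]
      cases hcase : (cs.drop i).dropWhile identChar with
      | nil =>
        left
        have hnil : cs.drop (i + t.length) = [] := by rw [hdw, hcase]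
        have := congrArg List.length hnil
        simp only [List.length_drop, List.length_nil] at this
        omega
      | cons x xs =>
        right
        have hne : cs.drop (i + t.length) = x :: xs := by rw [hdw, hcase]
        have hlt : i + t.length < cs.length := by
          by_contra hge
          have hnil : cs.drop (i + t.length) = [] := List.drop_eq_nil_of_le (by omega)
          rw [hne] at hnil; simp at hnil
        have hgd2 : cs.getD (i + t.length) default = x := by
          have hcons := List.drop_eq_getElem_cons hlt
          rw [hne] at hcons
          have hgd := List.getD_eq_getElem cs default hlt
          rw [hgd]; exact ((List.cons.injEq ..).mp hcons.symm).1
        rw [hgd2]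
        exact dropWhile_head_false (cs.drop i) x xs hcase

-- no token matches strictly inside an identifier run (left boundary fails)
theorem matchGo_zero_of_noleft (cs : List Char) (i : Nat)
    (h0 : i ≠ 0) (hprev : identChar (cs.getD (i - 1) default) = true) :
    ∀ ts, matchGo cs i ts = 0 := by
  intro ts
  induction ts with
  | nil => rfl
  | cons t ts ih =>
    have hmid : (decide (i = 0) || !identChar (cs.getD (i - 1) default)) = false := by
      rw [hprev]; simp [h0]
    have hc : condAt cs i t = false := by
      unfold condAt
      rw [hmid]
      simp
    simp [matchGo, hc, ih]

-- no token matches at a non-identifier character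
theorem matchGo_zero_of_nonident (cs : List Char) (i : Nat) (hi : i < cs.length)
    (hni : identChar (cs.getD i default) = false) :
    ∀ ts, (∀ t ∈ ts, t ≠ [] ∧ ∀ c ∈ t, identChar c = true) → matchGo cs i ts = 0 := by
  intro ts hts
  induction ts with
  | nil => rfl
  | cons t ts ih =>
    obtain ⟨htne, hta⟩ := hts t (by simp)
    have hfst : ((cs.drop i).take t.length == t) = false := by
      apply beq_eq_false_iff_ne.mpr
      intro heq
      cases t with
      | nil => exact htne rfl
      | cons c t' =>
        have hdrop : cs.drop i = cs[i] :: cs.drop (i + 1) := List.drop_eq_getElem_cons hi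
        have hgd : cs.getD i default = cs[i] := List.getD_eq_getElem cs default hi
        rw [hdrop] at heq
        simp only [List.length_cons, List.take_succ_cons, List.cons.injEq] at heq
        have hident : identChar cs[i] = true := by rw [heq.1]; exact hta c (by simp)
        rw [hgd, hident] at hni; exact absurd hni (by simp)
    have hc : condAt cs i t = false := by
      unfold condAt
      rw [hfst]
      simp
    simp [matchGo, hc, ih (fun t' ht' => hts t' (by simp [ht']))]

-- at the start of an identifier run, the scan returns the run's length iff the run is a known token
theorem matchGo_eq (cs : List Char) (i : Nat) (hi : i < cs.length)
    (hb : i = 0 ∨ identChar (cs.getD (i - 1) default) = false)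
    (_hident : identChar (cs.getD i default) = true) :
    ∀ ts, (∀ t ∈ ts, t ≠ [] ∧ ∀ c ∈ t, identChar c = true) →
      matchGo cs i ts = if (cs.drop i).takeWhile identChar ∈ ts then ((cs.drop i).takeWhile identChar).length else 0 := by
  intro ts hts
  induction ts with
  | nil => simp [matchGo]
  | cons t ts ih =>
    obtain ⟨htne, hta⟩ := hts t (by simp)
    by_cases hc : condAt cs i t
    · have ht : t = (cs.drop i).takeWhile identChar := (condAt_iff cs i hi hb t htne hta).mp hc
      simp [matchGo, hc, ← ht]
    · have ht : t ≠ (cs.drop i).takeWhile identChar := fun h =>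
        hc ((condAt_iff cs i hi hb t htne hta).mpr h)
      rw [matchGo, if_neg hc, ih (fun t' ht' => hts t' (by simp [ht']))]
      by_cases hmem : (cs.drop i).takeWhile identChar ∈ ts
      · rw [if_pos hmem, if_pos (List.mem_cons_of_mem t hmem)]
      · rw [if_neg hmem, if_neg (by
          intro h
          rcases List.mem_cons.mp h with h | h
          · exact ht h.symm
          · exact hmem h)]

-- proof-side reference for B's loop, without the accumulator
def emitB (cs : List Char) (i : Nat) : List (List Char) :=
  if _hi : i < cs.length then
    if _hm : matchGo cs i tokens ≠ 0 then
      typWrap ((cs.drop i).take (matchGo cs i tokens)) :: emitB cs (i + matchGo cs i tokens)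
    else
      [cs.getD i default] :: emitB cs (i + 1)
  else []
termination_by cs.length - i
decreasing_by
  · omega
  · omega

theorem loopB_eq (cs : List Char) (i : Nat) (out : List (List Char)) :
    loopB cs cs.length i out = out ++ emitB cs i := by
  rw [loopB, emitB]
  by_cases hi : i < cs.length
  · rw [dif_pos hi, dif_pos hi]
    by_cases hm : matchGo cs i tokens ≠ 0
    · rw [dif_pos hm, dif_pos hm, loopB_eq cs (i + matchGo cs i tokens)]
      simp
    · rw [dif_neg hm, dif_neg hm, loopB_eq cs (i + 1)]
      simp
  · rw [dif_neg hi, dif_neg hi]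
    simp
termination_by cs.length - i
decreasing_by
  · omega
  · omega

-- skipping through a run of positions where no token matches emits the characters one by one
theorem emitB_run (cs : List Char) (k : Nat) : ∀ i, i + k ≤ cs.length →
    (∀ p, i ≤ p → p < i + k → matchGo cs p tokens = 0) →
    emitB cs i = ((cs.drop i).take k).map (fun c => [c]) ++ emitB cs (i + k) := by
  induction k with
  | zero => intro i _ _; simp
  | succ k ih =>
    intro i hik hz
    have hi : i < cs.length := by omega
    have hm : matchGo cs i tokens = 0 := hz i (Nat.le_refl i) (by omega)
    have hdrop : cs.drop i = cs[i] :: cs.drop (i + 1) := List.drop_eq_getElem_cons hi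
    have hgd : cs.getD i default = cs[i] := List.getD_eq_getElem cs default hi
    have hstep : i + 1 + k = i + (k + 1) := by omega
    rw [emitB, dif_pos hi, dif_neg (show ¬ matchGo cs i tokens ≠ 0 by simp [hm])]
    rw [ih (i + 1) (by omega) (fun p hp1 hp2 => hz p (by omega) (by omega)), hstep]
    rw [hdrop, hgd]
    simp only [List.take_succ_cons, List.map_cons, List.cons_append]

-- identifier characters inside the run starting at i
theorem run_chars (cs : List Char) (i : Nat) :
    ∀ q, i ≤ q → q < i + ((cs.drop i).takeWhile identChar).length →
      identChar (cs.getD q default) = true := by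
  intro q hq1 hq2
  have hlen : ((cs.drop i).takeWhile identChar).length ≤ (cs.drop i).length :=
    (List.takeWhile_sublist identChar).length_le
  have hdl : (cs.drop i).length = cs.length - i := List.length_drop ..
  have hq : q < cs.length := by omega
  have hqi : q - i < ((cs.drop i).takeWhile identChar).length := by omega
  have hqd : q - i < (cs.drop i).length := by omega
  have hgd : cs.getD q default = cs[q] := List.getD_eq_getElem cs default hq
  have hgd2 : cs[q] = (cs.drop i)[q - i]'hqd := by
    rw [List.getElem_drop]
    congr 1; omega
  have hpre : (cs.drop i).takeWhile identChar <+: cs.drop i := List.takeWhile_prefix identChar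
  have h1 : ((cs.drop i).takeWhile identChar)[q - i]'hqi = (cs.drop i)[q - i]'hqd :=
    hpre.getElem hqi
  have hmem : ((cs.drop i).takeWhile identChar)[q - i]'hqi ∈ (cs.drop i).takeWhile identChar :=
    List.getElem_mem hqi
  have hident := List.mem_takeWhile_imp hmem
  rw [hgd, hgd2, ← h1]
  exact hident

-- main equivalence: from any position that is not strictly inside an identifier run
theorem emitB_eq_specA (cs : List Char) (i : Nat) (hle : i ≤ cs.length)
    (hni : i < cs.length → identChar (cs.getD i default) = true →
      (i = 0 ∨ identChar (cs.getD (i - 1) default) = false)) :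
    (emitB cs i).flatten = (specA (cs.drop i)).flatten := by
  by_cases hi : i < cs.length
  · have hdrop : cs.drop i = cs[i] :: cs.drop (i + 1) := List.drop_eq_getElem_cons hi
    have hgd : cs.getD i default = cs[i] := List.getD_eq_getElem cs default hi
    by_cases hc : identChar (cs.getD i default)
    · have hb := hni hi hc
      have htw : (cs.drop i).takeWhile identChar
          = cs[i] :: (cs.drop (i + 1)).takeWhile identChar := by
        rw [hdrop, List.takeWhile_cons_of_pos (by rw [← hgd]; exact hc)]
      have htne : (cs.drop i).takeWhile identChar ≠ [] := by rw [htw]; simp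
      have hlen : ((cs.drop i).takeWhile identChar).length ≤ (cs.drop i).length :=
        (List.takeWhile_sublist identChar).length_le
      have hdl : (cs.drop i).length = cs.length - i := List.length_drop ..
      have hjle : i + ((cs.drop i).takeWhile identChar).length ≤ cs.length := by omega
      have htl : 0 < ((cs.drop i).takeWhile identChar).length :=
        List.length_pos_of_ne_nil htne
      have hm := matchGo_eq cs i hi hb hc tokens tokens_ok
      have hdropj : cs.drop (i + ((cs.drop i).takeWhile identChar).length)
          = (cs.drop i).dropWhile identChar := by
        have h0 := drop_len_takeWhile identChar (cs.drop i)
        rw [List.drop_drop] at h0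
        rw [← h0]
      have hnextni : i + ((cs.drop i).takeWhile identChar).length < cs.length →
          identChar (cs.getD (i + ((cs.drop i).takeWhile identChar).length) default) = true →
          (i + ((cs.drop i).takeWhile identChar).length = 0 ∨
            identChar (cs.getD (i + ((cs.drop i).takeWhile identChar).length - 1) default) = false) := by
        intro hjlt hjident
        exfalso
        have hdj : cs.drop (i + ((cs.drop i).takeWhile identChar).length)
            = cs[i + ((cs.drop i).takeWhile identChar).length]
              :: cs.drop (i + ((cs.drop i).takeWhile identChar).length + 1) :=
          List.drop_eq_getElem_cons hjlt
        have hgdj : cs.getD (i + ((cs.drop i).takeWhile identChar).length) default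
            = cs[i + ((cs.drop i).takeWhile identChar).length] :=
          List.getD_eq_getElem cs default hjlt
        have hfalse : identChar cs[i + ((cs.drop i).takeWhile identChar).length] = false := by
          apply dropWhile_head_false (cs.drop i)
          rw [← hdropj, hdj]
        rw [hgdj, hfalse] at hjident
        exact absurd hjident (by simp)
      have htake : (cs.drop i).take ((cs.drop i).takeWhile identChar).length
          = (cs.drop i).takeWhile identChar := take_len_takeWhile identChar (cs.drop i)
      have hspec : specA (cs.drop i)
          = (if CUSTOM_TYPES.contains ((cs.drop i).takeWhile identChar)
              then typWrap ((cs.drop i).takeWhile identChar)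
              else (cs.drop i).takeWhile identChar)
            :: specA (cs.drop (i + ((cs.drop i).takeWhile identChar).length)) := by
      -- unfold one step of specA at the cons decomposition of the suffix
        conv_lhs => rw [hdrop, specA]
        rw [if_pos (by rw [← hgd]; exact hc)]
        congr 1
        · rw [htw]
        · rw [hdropj, hdrop, List.dropWhile_cons_of_pos (by rw [← hgd]; exact hc)]
      by_cases hmem : (cs.drop i).takeWhile identChar ∈ tokens
      · have hm0 : matchGo cs i tokens = ((cs.drop i).takeWhile identChar).length := by
          rw [hm, if_pos hmem]
        have hcond : matchGo cs i tokens ≠ 0 := by rw [hm0]; omega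
        rw [emitB, dif_pos hi, dif_pos hcond, hm0, htake]
        rw [List.flatten_cons, emitB_eq_specA cs (i + ((cs.drop i).takeWhile identChar).length)
          hjle hnextni, hspec, List.flatten_cons]
        have hcontains : CUSTOM_TYPES.contains ((cs.drop i).takeWhile identChar) = true :=
          List.elem_eq_true_of_mem ((mem_tokens_iff _).mp hmem)
        rw [hcontains]
        simp
      · have hm0 : matchGo cs i tokens = 0 := by rw [hm, if_neg hmem]
        have hemit : emitB cs i
            = ((cs.drop i).take ((cs.drop i).takeWhile identChar).length).map (fun c => [c])
              ++ emitB cs (i + ((cs.drop i).takeWhile identChar).length) := by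
          apply emitB_run cs ((cs.drop i).takeWhile identChar).length i hjle
          intro p hp1 hp2
          rcases Nat.eq_or_lt_of_le hp1 with heq | hlt
          -- p = i: the run is not a known token, so the scan finds nothing
          · rw [← heq]; exact hm0
          -- i < p: the left boundary fails, the predecessor is an identifier char
          · exact matchGo_zero_of_noleft cs p (by omega)
              (run_chars cs i (p - 1) (by omega) (by omega)) tokens
        rw [hemit, htake, List.flatten_append, flatten_map_singleton,
          emitB_eq_specA cs (i + ((cs.drop i).takeWhile identChar).length) hjle hnextni,
          hspec, List.flatten_cons]
        have hcontains : CUSTOM_TYPES.contains ((cs.drop i).takeWhile identChar) = false := by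
          by_cases h : (cs.drop i).takeWhile identChar ∈ CUSTOM_TYPES
          · exact absurd ((mem_tokens_iff _).mpr h) hmem
          · simp [h]
        rw [hcontains]
        simp
    · have hm0 : matchGo cs i tokens = 0 :=
        matchGo_zero_of_nonident cs i hi (by simpa using hc) tokens tokens_ok
      rw [emitB, dif_pos hi, dif_neg (show ¬ matchGo cs i tokens ≠ 0 by simp [hm0])]
      rw [List.flatten_cons, emitB_eq_specA cs (i + 1) (by omega)
        (by intro _ _; right; simpa [hgd] using hc)]
      conv_rhs => rw [hdrop, specA]
      rw [if_neg (by rw [← hgd]; exact hc), List.flatten_cons, hgd]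
  · have hend : i = cs.length := by omega
    rw [emitB, dif_neg hi]
    simp [hend, List.drop_length, specA]
termination_by cs.length - i
decreasing_by
  · omega
  · omega
  · omega

-- ===== VERDICT (by name: the statement is the Claim_ definition above) =====
theorem inject_custom_type_markup_spec : Claim_equal_inject_custom_type_markup := by
  intro s _
  unfold Spec_inject_custom_type_markup inject_custom_type_markup inject_custom_type_markup_alt
  rw [loopA_eq s.toList 0 [] (by omega), loopB_eq s.toList 0 []]
  simp only [List.nil_append]
  rw [emitB_eq_specA s.toList 0 (by omega) (by intro _ _; left; rfl)]
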